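-- pv_equiv track=rewrite | github.com/FennexFox/packetflow_foundry | builders/packet-workflow/retained-skills/gh-address-review-threads/scripts/collect_review_threads.py | select_representative_files
-- ===== SOURCE A (Python) =====
-- GROUP_SAMPLE_LIMIT = 16
--
-- def sample_parent(path: str) -> str:
--     return path.rsplit("/", 1)[0] if "/" in path else "."
--
-- def select_representative_files(paths: list[str], limit: int = GROUP_SAMPLE_LIMIT) -> list[str]:
--     ordered_paths: list[str] = []
--     for path in paths:
--         if path not in ordered_paths:
--             ordered_paths.append(path)
--     if len(ordered_paths) <= limit:
--         return ordered_paths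
--
--     buckets: dict[str, list[str]] = {}
--     bucket_order: list[str] = []
--     for path in ordered_paths:
--         parent = sample_parent(path)
--         if parent not in buckets:
--             buckets[parent] = []
--             bucket_order.append(parent)
--         buckets[parent].append(path)
--
--     selected: list[str] = []
--     while len(selected) < limit:
--         progressed = False
--         for parent in bucket_order:
--             bucket = buckets[parent]
--             if not bucket:
--                 continue
--             selected.append(bucket.pop(0))
--             progressed = True
--             if len(selected) >= limit:
--                 break
--         if not progressed:
--             break
--
--     original_index = {path: index for index, path in enumerate(ordered_paths)}
--     return sorted(selected, key=original_index.__getitem__)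
-- ===== SOURCE B (Python) =====
-- GROUP_SAMPLE_LIMIT = 16
--
-- def sample_parent(path: str) -> str:
--     return path.rsplit("/", 1)[0] if "/" in path else "."
--
-- def select_representative_files(paths: list[str], limit: int = GROUP_SAMPLE_LIMIT) -> list[str]:
--     # Order-preserving dedup.
--     ordered_paths = list(dict.fromkeys(paths))
--     if len(ordered_paths) <= limit:
--         return ordered_paths
--
--     # One pass: per-parent first-appearance order and within-parent rank.
--     bucket_order_idx: dict[str, int] = {}
--     within_rank: dict[str, int] = {}
--     counts: dict[str, int] = {}
--     for path in ordered_paths: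
--         parent = sample_parent(path)
--         if parent not in bucket_order_idx:
--             bucket_order_idx[parent] = len(bucket_order_idx)
--         r = counts.get(parent, 0)
--         within_rank[path] = r
--         counts[parent] = r + 1
--
--     # Round-robin selection = the `limit` smallest under (within rank, bucket order).
--     chosen = set(
--         sorted(
--             ordered_paths,
--             key=lambda p: (within_rank[p], bucket_order_idx[sample_parent(p)]),
--         )[: max(limit, 0)]
--     )
--     return [p for p in ordered_paths if p in chosen]
-- ===== Notes on version B (the rewrite author's own statement) =====
-- stated objective: faster
-- what changed: A's destructive round-robin while-loop that pops bucket heads until the limit is replaced by a one-pass computation of (within-parent rank, parent first-appearance index) per path and a single sort on that key, whose first `limit` entries are exactly the round-robin sample; the order-preserving dedup uses dict.fromkeys instead of a quadratic list-membership scan and list.pop(0) shifting disappears.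
import Mathlib
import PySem

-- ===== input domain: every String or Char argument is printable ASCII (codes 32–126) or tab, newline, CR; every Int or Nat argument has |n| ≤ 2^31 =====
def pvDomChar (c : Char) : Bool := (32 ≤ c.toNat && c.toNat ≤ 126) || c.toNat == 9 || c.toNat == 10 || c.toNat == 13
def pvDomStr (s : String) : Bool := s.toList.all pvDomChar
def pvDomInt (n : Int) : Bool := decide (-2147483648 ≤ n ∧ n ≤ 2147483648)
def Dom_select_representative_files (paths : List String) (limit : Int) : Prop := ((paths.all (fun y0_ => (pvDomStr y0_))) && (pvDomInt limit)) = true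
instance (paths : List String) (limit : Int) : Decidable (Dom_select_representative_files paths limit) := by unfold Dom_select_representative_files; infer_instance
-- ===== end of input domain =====

-- B replaces A's destructive round-robin while-loop over parent buckets by a sort of the deduped
-- paths on the key (within-parent rank, parent first-appearance index); same return value.

-- ===== PORT A =====
-- shared helper: path.rsplit("/", 1)[0] if "/" in path else "."
-- rsplit("/", 1)[0] is the prefix before the LAST "/" (exact here since the separator is one character)
def sample_parent (path : String) : String :=
  if PySem.Str.isIn "/" path then
    String.ofList (path.toList.take (PySem.Str.rfind path "/").toNat)
  else "."

-- the inner `for parent in bucket_order` loop with its break; returns (buckets, selected, progressed)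
def pvA_round : List String → PySem.Dict String (List String) → List String → Bool → Int →
    PySem.Dict String (List String) × List String × Bool
  | [], b, sel, prog, _ => (b, sel, prog)
  | parent :: rest, b, sel, prog, limit =>
    match b.getD parent [] with
    | [] => pvA_round rest b sel prog limit
    | x :: xs =>
      if limit ≤ ((sel ++ [x]).length : Int) then (b.insert parent xs, sel ++ [x], true)
      else pvA_round rest (b.insert parent xs) (sel ++ [x]) true limit

-- the `while len(selected) < limit` loop; each iteration that recurses appends ≥ 1 element while
-- len(selected) < limit, so fuel limit.toNat + 1 is never exhausted (a pure fuel guard)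
def pvA_while : Nat → PySem.Dict String (List String) → List String → Int → List String → List String
  | 0, _, _, _, sel => sel
  | fuel + 1, b, bo, limit, sel =>
    if (sel.length : Int) < limit then
      match pvA_round bo b sel false limit with
      | (b', sel', prog) => if prog then pvA_while fuel b' bo limit sel' else sel'
    else sel

-- buckets[parent] / original_index[path] never raise: the key is always present (getD default unused)
def select_representative_files (paths : List String) (limit : Int) : List String :=
  let ordered := paths.foldl (fun acc path => if path ∈ acc then acc else acc ++ [path]) []
  if (ordered.length : Int) ≤ limit then ordered
  else
    let bb := ordered.foldl (fun (st : PySem.Dict String (List String) × List String) path =>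
      let parent := sample_parent path
      let st := if st.1.contains parent then st else (st.1.insert parent [], st.2 ++ [parent])
      (st.1.modify parent [] (fun bkt => bkt ++ [path]), st.2)) (PySem.Dict.empty, [])
    let selected := pvA_while (limit.toNat + 1) bb.1 bb.2 limit []
    let original_index := (PySem.List.enumerate ordered 0).foldl
      (fun d ip => d.insert ip.2 ip.1) (PySem.Dict.empty : PySem.Dict String Int)
    PySem.List.sorted selected (fun path => original_index.getD path 0) false

-- ===== PORT B =====
-- within_rank[p] / bucket_order_idx[...] never raise: every key is present (getD default unused)
def select_representative_files_alt (paths : List String) (limit : Int) : List String :=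
  let ordered := PySem.List.dedup paths
  if (ordered.length : Int) ≤ limit then ordered
  else
    let st := ordered.foldl
      (fun (st : PySem.Dict String Int × PySem.Dict String Int × PySem.Dict String Int) path =>
        let parent := sample_parent path
        let bidx := if st.1.contains parent then st.1 else st.1.insert parent (st.1.size : Int)
        let r := st.2.2.getD parent 0
        (bidx, st.2.1.insert path r, st.2.2.insert parent (r + 1)))
      (PySem.Dict.empty, PySem.Dict.empty, PySem.Dict.empty)
    let chosen : PySem.Set String := PySem.Set.ofList (PySem.List.slice
      (PySem.List.sorted2 ordered (fun p => st.2.1.getD p 0)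
        (fun p => st.1.getD (sample_parent p) 0) false)
      none (some (max limit 0)))
    ordered.filter (fun p => decide (p ∈ chosen))

-- ===== PRECONDITION & SPEC =====
def Spec_select_representative_files (paths : List String) (limit : Int) (out : List String) : Prop := out = select_representative_files_alt paths limit
instance (paths : List String) (limit : Int) (out : List String) : Decidable (Spec_select_representative_files paths limit out) := by unfold Spec_select_representative_files; infer_instance

-- ===== CLAIM (what is proved, stated in full; the proofs are below) =====
def Claim_equal_select_representative_files : Prop := ∀ (paths : List String) (limit : Int), Dom_select_representative_files paths limit → Spec_select_representative_files paths limit (select_representative_files paths limit)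

-- ===== LEMMAS AND PROOFS =====

def pvRR : Nat → (String → List String) → List String → List String
  | 0, _, _ => []
  | fuel + 1, g, bo =>
    let rl := bo.filterMap (fun q => (g q).head?)
    if rl.isEmpty then [] else rl ++ pvRR fuel (fun q => (g q).tail) bo

lemma pvRR_congr (fuel : Nat) (g g' : String → List String) (bo : List String)
    (h : ∀ q ∈ bo, g q = g' q) : pvRR fuel g bo = pvRR fuel g' bo := by
  induction fuel generalizing g g' with
  | zero => rfl
  | succ n ih =>
    simp only [pvRR]
    rw [List.filterMap_congr (fun q hq => by rw [h q hq]),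
      ih (fun q => (g q).tail) (fun q => (g' q).tail) (fun q hq => by simp only []; rw [h q hq])]

lemma pvA_dedup_eq (paths : List String) :
    paths.foldl (fun acc path => if path ∈ acc then acc else acc ++ [path]) [] =
      PySem.List.dedup paths := by
  unfold PySem.List.dedup PySem.Set.ofList
  have : (fun (acc : List String) path => if path ∈ acc then acc else acc ++ [path]) =
      PySem.Set.add := by
    funext acc p
    simp [PySem.Set.add]
  rw [this]; rfl

lemma pvRR_take_succ (fuel k : Nat) (g : String → List String) (bo : List String)
    (hk : k ≤ fuel) : (pvRR fuel g bo).take k = (pvRR (fuel + 1) g bo).take k := by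
  induction fuel generalizing g k with
  | zero => interval_cases k <;> rfl
  | succ n ih =>
    simp only [pvRR]
    by_cases he : (bo.filterMap (fun q => (g q).head?)).isEmpty
    · simp [he]
    · have hlen : 1 ≤ (bo.filterMap (fun q => (g q).head?)).length := by
        rcases hx : bo.filterMap (fun q => (g q).head?) with _ | ⟨a, t⟩
        · rw [hx] at he; simp at he
        · simp
      have hunf : pvRR (n + 1) (fun q => (g q).tail) bo =
          (if (List.filterMap (fun x => (g x).tail.head?) bo).isEmpty = true then []
            else List.filterMap (fun x => (g x).tail.head?) bo ++
              pvRR n (fun q => (g q).tail.tail) bo) := by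
        simp only [pvRR]
      simp only [he, Bool.false_eq_true, if_false, List.take_append]
      rw [ih (k - (bo.filterMap (fun q => (g q).head?)).length) _ (by omega), hunf]

lemma pvRR_take_eq (f₁ f₂ k : Nat) (g : String → List String) (bo : List String)
    (h₁ : k ≤ f₁) (h₂ : k ≤ f₂) : (pvRR f₁ g bo).take k = (pvRR f₂ g bo).take k := by
  have aux : ∀ (f d : Nat), k ≤ f → (pvRR f g bo).take k = (pvRR (f + d) g bo).take k := by
    intro f d hf
    induction d with
    | zero => rfl
    | succ m ihm =>
      rw [ihm, pvRR_take_succ (f + m) k g bo (by omega)]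
      rfl
  rcases le_total f₁ f₂ with h | h
  · obtain ⟨d, rfl⟩ := Nat.exists_eq_add_of_le h
    exact aux f₁ d h₁
  · obtain ⟨d, rfl⟩ := Nat.exists_eq_add_of_le h
    exact (aux f₂ d h₂).symm

def pvRL (b : PySem.Dict String (List String)) (bo : List String) : List String :=
  bo.filterMap (fun q => (b.getD q []).head?)

lemma pvRL_insert_not_mem (b : PySem.Dict String (List String)) (bo : List String)
    (q : String) (v : List String) (hq : q ∉ bo) :
    pvRL (b.insert q v) bo = pvRL b bo := by
  unfold pvRL
  refine List.filterMap_congr (fun q' hq' => ?_)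
  rw [PySem.Dict.getD_insert, if_neg (by rintro rfl; exact hq hq')]

lemma pvRL_cons_nil {b : PySem.Dict String (List String)} {q : String} (rest : List String)
    (hbq : b.getD q [] = []) : pvRL b (q :: rest) = pvRL b rest := by
  unfold pvRL; simp [List.filterMap_cons, hbq]

lemma pvRL_cons {b : PySem.Dict String (List String)} {q x : String} {xs : List String}
    (rest : List String) (hbq : b.getD q [] = x :: xs) :
    pvRL b (q :: rest) = x :: pvRL b rest := by
  unfold pvRL; simp [List.filterMap_cons, hbq]

lemma pvA_round_sel (bo : List String) (b : PySem.Dict String (List String))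
    (sel : List String) (prog : Bool) (limit : Int) (hnd : bo.Nodup)
    (h : (sel.length : Int) < limit) :
    (pvA_round bo b sel prog limit).2.1 = sel ++ (pvRL b bo).take (limit - sel.length).toNat := by
  induction bo generalizing b sel prog with
  | nil => simp [pvA_round, pvRL]
  | cons q rest ih =>
    rw [List.nodup_cons] at hnd
    rcases hbq : b.getD q [] with _ | ⟨x, xs⟩
    · rw [pvRL_cons_nil rest hbq]
      simp only [pvA_round, hbq]
      exact ih b sel prog hnd.2 h
    · rw [pvRL_cons rest hbq]
      simp only [pvA_round, hbq]
      by_cases hlim : limit ≤ (((sel ++ [x]).length : Nat) : Int)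
      · rw [if_pos hlim]
        have h1 : (limit - sel.length).toNat = 1 := by simp at hlim ⊢; omega
        simp [h1]
      · rw [if_neg hlim]
        rw [ih (b.insert q xs) (sel ++ [x]) true hnd.2 (by simpa using hlim),
          pvRL_insert_not_mem b rest q xs hnd.1]
        have h2 : (limit - sel.length).toNat = ((limit - (sel ++ [x]).length).toNat) + 1 := by
          simp at hlim ⊢; omega
        simp only [h2, List.take_succ_cons, List.append_assoc, List.singleton_append]

lemma pvA_round_prog (bo : List String) (b : PySem.Dict String (List String))
    (sel : List String) (prog : Bool) (limit : Int) (hnd : bo.Nodup)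
    (h : (sel.length : Int) < limit) :
    (pvA_round bo b sel prog limit).2.2 = (prog || !(pvRL b bo).isEmpty) := by
  induction bo generalizing b sel prog with
  | nil => simp [pvA_round, pvRL]
  | cons q rest ih =>
    rw [List.nodup_cons] at hnd
    rcases hbq : b.getD q [] with _ | ⟨x, xs⟩
    · rw [pvRL_cons_nil rest hbq]
      simp only [pvA_round, hbq]
      exact ih b sel prog hnd.2 h
    · rw [pvRL_cons rest hbq]
      simp only [pvA_round, hbq]
      by_cases hlim : limit ≤ (((sel ++ [x]).length : Nat) : Int)
      · rw [if_pos hlim]; simp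
      · rw [if_neg hlim]
        rw [ih (b.insert q xs) (sel ++ [x]) true hnd.2 (by simpa using hlim)]
        simp

lemma pvA_round_off (bo : List String) (b : PySem.Dict String (List String))
    (sel : List String) (prog : Bool) (limit : Int) (q : String) (hq : q ∉ bo) :
    ((pvA_round bo b sel prog limit).1).getD q [] = b.getD q [] := by
  induction bo generalizing b sel prog with
  | nil => rfl
  | cons p rest ih =>
    simp only [List.mem_cons, not_or] at hq
    rcases hbq : b.getD p [] with _ | ⟨x, xs⟩
    · simp only [pvA_round, hbq]
      exact ih b sel prog hq.2
    · simp only [pvA_round, hbq]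
      by_cases hlim : limit ≤ (((sel ++ [x]).length : Nat) : Int)
      · rw [if_pos hlim]
        simp only []
        rw [PySem.Dict.getD_insert, if_neg hq.1]
      · rw [if_neg hlim, ih _ _ _ hq.2]
        rw [PySem.Dict.getD_insert, if_neg hq.1]

lemma pvA_round_buckets (bo : List String) (b : PySem.Dict String (List String))
    (sel : List String) (prog : Bool) (limit : Int) (hnd : bo.Nodup)
    (h : (sel.length : Int) < limit)
    (hfull : ((sel.length : Int) + (pvRL b bo).length) < limit) :
    ∀ q ∈ bo, ((pvA_round bo b sel prog limit).1).getD q [] = (b.getD q []).tail := by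
  induction bo generalizing b sel prog with
  | nil => simp
  | cons p rest ih =>
    rw [List.nodup_cons] at hnd
    intro q hq
    rcases hbq : b.getD p [] with _ | ⟨x, xs⟩
    · rw [pvRL_cons_nil rest hbq] at hfull
      simp only [pvA_round, hbq]
      rcases List.mem_cons.mp hq with rfl | hq'
      · rw [pvA_round_off rest b sel prog limit q hnd.1, hbq]; rfl
      · exact ih b sel prog hnd.2 h hfull q hq'
    · rw [pvRL_cons rest hbq] at hfull
      simp only [List.length_cons] at hfull
      simp only [pvA_round, hbq]
      have hlim : ¬ limit ≤ (((sel ++ [x]).length : Nat) : Int) := by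
        simp; push_cast; omega
      rw [if_neg hlim]
      rcases List.mem_cons.mp hq with rfl | hq'
      · rw [pvA_round_off rest _ _ _ limit q hnd.1, PySem.Dict.getD_insert, if_pos rfl, hbq]; rfl
      · have hne : q ≠ p := by rintro rfl; exact hnd.1 hq'
        have hstep := ih (b.insert p xs) (sel ++ [x]) true hnd.2
          (by simp; push_cast; omega)
          (by rw [pvRL_insert_not_mem b rest p xs hnd.1]; push_cast at hfull ⊢; simp; omega)
          q hq'
        rw [hstep, PySem.Dict.getD_insert, if_neg hne]

lemma pvA_while_spec (fuel : Nat) (b : PySem.Dict String (List String)) (bo : List String)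
    (limit : Int) (sel : List String) (hnd : bo.Nodup) :
    pvA_while fuel b bo limit sel =
      sel ++ (pvRR fuel (fun q => b.getD q []) bo).take (limit - sel.length).toNat := by
  induction fuel generalizing b sel with
  | zero => simp [pvA_while, pvRR]
  | succ n ih =>
    have hrl : (bo.filterMap fun q => (b.getD q []).head?) = pvRL b bo := rfl
    simp only [pvA_while, pvRR, hrl]
    by_cases hcond : (sel.length : Int) < limit
    · rw [if_pos hcond]
      have hsel := pvA_round_sel bo b sel false limit hnd hcond
      have hprog := pvA_round_prog bo b sel false limit hnd hcond
      rw [Bool.false_or] at hprog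
      by_cases hre : (pvRL b bo).isEmpty
      · rw [List.isEmpty_iff] at hre
        rw [hre] at hsel
        simp only [List.take_nil, List.append_nil] at hsel
        rw [hprog, hre]
        simp [hsel]
      · have hne : pvRL b bo ≠ [] := by simpa [List.isEmpty_iff] using hre
        have hbe : (pvRL b bo).isEmpty = false := by simpa using hre
        rw [hprog, hbe]
        simp only [Bool.not_false, if_true, Bool.false_eq_true, if_false]
        by_cases hfull : ((sel.length : Int) + (pvRL b bo).length) < limit
        · have htk : (pvRL b bo).length ≤ (limit - sel.length).toNat := by omega
          have htake : (pvRL b bo).take (limit - sel.length).toNat = pvRL b bo :=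
            List.take_of_length_le htk
          have hb' : ∀ q ∈ bo,
              ((pvA_round bo b sel false limit).1).getD q [] = (b.getD q []).tail :=
            pvA_round_buckets bo b sel false limit hnd hcond hfull
          rw [ih (pvA_round bo b sel false limit).1 (pvA_round bo b sel false limit).2.1,
            pvRR_congr n _ (fun q => (b.getD q []).tail) bo hb', hsel, htake,
            List.take_append]
          have hlen2 : ((limit - ((sel ++ pvRL b bo).length : Nat)) : Int).toNat
              = (limit - sel.length).toNat - (pvRL b bo).length := by
            simp only [List.length_append]; push_cast; omega
          rw [hlen2, List.take_of_length_le htk, List.append_assoc]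
        · have hKle : (limit - sel.length).toNat ≤ (pvRL b bo).length := by omega
          rw [ih (pvA_round bo b sel false limit).1 (pvA_round bo b sel false limit).2.1, hsel]
          have hlen' : (((sel ++ (pvRL b bo).take (limit - sel.length).toNat).length : Nat) : Int)
              = limit := by
            simp only [List.length_append, List.length_take]; push_cast; omega
          rw [hlen']
          simp only [sub_self, Int.toNat_zero, List.take_zero, List.append_nil,
            List.take_append]
          have h0 : ((limit - sel.length).toNat - (pvRL b bo).length) = 0 := by omega
          rw [h0, List.take_zero, List.append_nil]
    · have h0 : (limit - (sel.length : Int)).toNat = 0 := by omega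
      rw [if_neg hcond, h0]
      simp

def pvTotal (g : String → List String) (bo : List String) : Nat :=
  (bo.map (fun q => (g q).length)).sum

lemma pvHeads_perm (bo : List String) (g : String → List String) :
    (bo.filterMap (fun q => (g q).head?) ++ bo.flatMap (fun q => (g q).tail)).Perm
      (bo.flatMap g) := by
  induction bo with
  | nil => rfl
  | cons q rest ih =>
    rcases hg : g q with _ | ⟨x, xs⟩
    · simpa [List.filterMap_cons, List.flatMap_cons, hg] using ih
    · simp only [List.filterMap_cons, List.flatMap_cons, hg, List.head?_cons,
        List.tail_cons, List.cons_append]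
      refine List.Perm.cons x ?_
      exact (List.perm_append_comm_assoc _ _ _).trans (List.Perm.append_left xs ih)

lemma pvTotal_tail (bo : List String) (g : String → List String) :
    pvTotal (fun q => (g q).tail) bo + (bo.filterMap (fun q => (g q).head?)).length
      = pvTotal g bo := by
  induction bo with
  | nil => rfl
  | cons q rest ih =>
    rcases hg : g q with _ | ⟨x, xs⟩ <;>
      simp only [pvTotal, List.map_cons, List.sum_cons, List.filterMap_cons, hg,
        List.head?_nil, List.head?_cons, List.tail_nil, List.tail_cons, List.length_nil,
        List.length_cons] at ih ⊢ <;> omega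

lemma pvRR_perm (fuel : Nat) (g : String → List String) (bo : List String)
    (h : pvTotal g bo ≤ fuel) : (pvRR fuel g bo).Perm (bo.flatMap g) := by
  induction fuel generalizing g with
  | zero =>
    have hall : ∀ q ∈ bo, g q = [] := by
      intro q hq
      have := List.sum_eq_zero_iff.mp (Nat.le_zero.mp h)
      have hlen := this ((g q).length) (List.mem_map_of_mem hq)
      exact List.eq_nil_of_length_eq_zero hlen
    have : bo.flatMap g = [] := List.flatMap_eq_nil_iff.mpr hall
    rw [this]; rfl
  | succ n ih =>
    simp only [pvRR]
    by_cases hre : (bo.filterMap (fun q => (g q).head?)).isEmpty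
    · rw [List.isEmpty_iff] at hre
      have hall : ∀ q ∈ bo, g q = [] := by
        intro q hq
        have := (List.filterMap_eq_nil_iff.mp hre) q hq
        rcases hgq : g q with _ | ⟨x, xs⟩
        · rfl
        · rw [hgq] at this; simp at this
      rw [List.flatMap_eq_nil_iff.mpr hall, hre]
      simp
    · have hlen1 : 1 ≤ (bo.filterMap (fun q => (g q).head?)).length := by
        rcases hx : bo.filterMap (fun q => (g q).head?) with _ | _
        · rw [hx] at hre; simp at hre
        · simp
      have htot := pvTotal_tail bo g
      have hrec := ih (fun q => (g q).tail) (by omega)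
      simp only [hre, Bool.false_eq_true, if_false]
      exact (List.Perm.append_left _ hrec).trans (pvHeads_perm bo g)

def pvG (L : List String) (q : String) : List String := L.filter (fun p => sample_parent p == q)

def pvBO (L : List String) : List String := PySem.List.dedup (L.map sample_parent)

def pvK1 (L : List String) (p : String) : Nat := List.idxOf p (pvG L (sample_parent p))

def pvK2 (L : List String) (p : String) : Nat := List.idxOf (sample_parent p) (pvBO L)

lemma pvG_mem {L : List String} {q p : String} :
    p ∈ pvG L q ↔ (p ∈ L ∧ sample_parent p = q) := by
  simp [pvG, List.mem_filter]

lemma pvBO_mem {L : List String} {q : String} : q ∈ pvBO L ↔ q ∈ L.map sample_parent :=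
  PySem.List.mem_dedup _ _

lemma pvBO_nodup (L : List String) : (pvBO L).Nodup := PySem.List.nodup_dedup _

lemma pvCount_flatMap (L : List String) (x : String) (bo : List String) (hnd : bo.Nodup) :
    (bo.flatMap (pvG L)).count x = if sample_parent x ∈ bo then L.count x else 0 := by
  induction bo with
  | nil => simp
  | cons q rest ih =>
    rw [List.nodup_cons] at hnd
    rw [List.flatMap_cons, List.count_append, ih hnd.2]
    by_cases hqx : sample_parent x = q
    · subst hqx
      rw [if_neg hnd.1, if_pos (by simp)]
      simp only [pvG]
      rw [List.count_filter (by simp)]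
      omega
    · have hx0 : (pvG L q).count x = 0 := by
        rw [List.count_eq_zero]
        intro hmem
        exact hqx (pvG_mem.mp hmem).2
      rw [hx0]
      by_cases hr : sample_parent x ∈ rest
      · rw [if_pos hr, if_pos (by simp [hr])]; omega
      · rw [if_neg hr, if_neg (by simp [hqx, hr])]

lemma pvFlatMap_perm (L : List String) :
    ((pvBO L).flatMap (pvG L)).Perm L := by
  rw [List.perm_iff_count]
  intro x
  rw [pvCount_flatMap L x (pvBO L) (pvBO_nodup L)]
  by_cases hx : x ∈ L
  · rw [if_pos (pvBO_mem.mpr (List.mem_map_of_mem hx))]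
  · rw [List.count_eq_zero.mpr hx]
    split <;> rfl

lemma pvBO_pairwise (L : List String) :
    (pvBO L).Pairwise (fun a b => (pvBO L).idxOf a < (pvBO L).idxOf b) := by
  rw [List.pairwise_iff_getElem]
  intro i j hi hj hij
  rw [List.Nodup.idxOf_getElem (pvBO_nodup L) i hi,
    List.Nodup.idxOf_getElem (pvBO_nodup L) j hj]
  exact hij

lemma pvFilterMap_pairwise (L : List String) (bo' : List String) (f : String → Option String)
    (w : String → Nat) (hpw : bo'.Pairwise (fun a b => w a < w b))
    (hf : ∀ q ∈ bo', ∀ p, f q = some p → pvK2 L p = w q) :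
    (bo'.filterMap f).Pairwise (fun a b => pvK2 L a < pvK2 L b) := by
  induction bo' with
  | nil => simp
  | cons q rest ih =>
    rw [List.pairwise_cons] at hpw
    rw [List.filterMap_cons]
    rcases hfq : f q with _ | p
    · exact ih hpw.2 (fun q' hq' => hf q' (List.mem_cons_of_mem q hq'))
    · refine List.Pairwise.cons ?_ (ih hpw.2 (fun q' hq' => hf q' (List.mem_cons_of_mem q hq')))
      intro b hb
      obtain ⟨q', hq', hq'b⟩ := List.mem_filterMap.mp hb
      rw [hf q (List.mem_cons_self) p hfq, hf q' (List.mem_cons_of_mem q hq') b hq'b]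
      exact hpw.1 q' hq'

lemma pvRL_fact (L : List String) (hnd : L.Nodup) (s : Nat) (q p : String)
    (hq : q ∈ pvBO L) (hsome : ((pvG L q).drop s).head? = some p) :
    pvK1 L p = s ∧ p ∈ L ∧ sample_parent p = q := by
  rw [List.head?_drop] at hsome
  obtain ⟨hlt, hget⟩ := List.getElem?_eq_some_iff.mp hsome
  have hmem : p ∈ pvG L q := hget ▸ List.getElem_mem hlt
  have hpar := (pvG_mem.mp hmem).2
  refine ⟨?_, (pvG_mem.mp hmem).1, hpar⟩
  have hgnd : (pvG L q).Nodup := List.Nodup.filter _ hnd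
  rw [pvK1, hpar, ← hget, List.Nodup.idxOf_getElem hgnd s hlt]

lemma pvRR_pairwise (L : List String) (hnd : L.Nodup) (fuel s : Nat) :
    (pvRR fuel (fun q => (pvG L q).drop s) (pvBO L)).Pairwise
      (fun a b => pvK1 L a < pvK1 L b ∨ (pvK1 L a = pvK1 L b ∧ pvK2 L a < pvK2 L b)) ∧
    ∀ p ∈ pvRR fuel (fun q => (pvG L q).drop s) (pvBO L), s ≤ pvK1 L p ∧ p ∈ L := by
  induction fuel generalizing s with
  | zero => exact ⟨by simp [pvRR], by simp [pvRR]⟩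
  | succ n ih =>
    simp only [pvRR]
    by_cases hre : ((pvBO L).filterMap (fun q => ((pvG L q).drop s).head?)).isEmpty
    · simp only [hre, if_true]
      exact ⟨by simp, by simp⟩
    · simp only [hre, Bool.false_eq_true, if_false]
      have htails : (fun q => ((pvG L q).drop s).tail) = (fun q => (pvG L q).drop (s + 1)) := by
        funext q; exact List.tail_drop
      rw [htails]
      have hrlmem : ∀ p ∈ (pvBO L).filterMap (fun q => ((pvG L q).drop s).head?),
          pvK1 L p = s ∧ p ∈ L := by
        intro p hp
        obtain ⟨q, hq, hsome⟩ := List.mem_filterMap.mp hp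
        obtain ⟨h1, h2, _⟩ := pvRL_fact L hnd s q p hq hsome
        exact ⟨h1, h2⟩
      have hrlpw : ((pvBO L).filterMap (fun q => ((pvG L q).drop s).head?)).Pairwise
          (fun a b => pvK2 L a < pvK2 L b) := by
        refine pvFilterMap_pairwise L (pvBO L) _ (fun q => (pvBO L).idxOf q)
          (pvBO_pairwise L) ?_
        intro q hq p hsome
        rw [pvK2, (pvRL_fact L hnd s q p hq hsome).2.2]
      constructor
      · rw [List.pairwise_append]
        refine ⟨?_, (ih (s + 1)).1, ?_⟩
        · refine hrlpw.imp_of_mem (fun {a b} ha hb hlt => ?_)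
          exact Or.inr ⟨by rw [(hrlmem a ha).1, (hrlmem b hb).1], hlt⟩
        · intro a ha b hb
          have h1 := (hrlmem a ha).1
          have h2 := ((ih (s + 1)).2 b hb).1
          exact Or.inl (by omega)
      · intro p hp
        rcases List.mem_append.mp hp with hp | hp
        · exact ⟨(hrlmem p hp).1.ge, (hrlmem p hp).2⟩
        · have := (ih (s + 1)).2 p hp
          exact ⟨by omega, this.2⟩

-- the Boolean lex comparator used by sorted2 for Int keys

lemma pvBefore_iff {α : Type} (k1 k2 : α → Int) (a b : α) :
    (decide (k1 a < k1 b) || (!decide (k1 b < k1 a) && decide (k2 a < k2 b))) = true ↔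
      (k1 a < k1 b ∨ (k1 a = k1 b ∧ k2 a < k2 b)) := by
  simp only [Bool.or_eq_true, Bool.and_eq_true, Bool.not_eq_true', decide_eq_true_iff,
    decide_eq_false_iff_not]
  constructor
  · rintro (h | ⟨h1, h2⟩)
    · exact Or.inl h
    · by_cases he : k1 a = k1 b
      · exact Or.inr ⟨he, h2⟩
      · exact Or.inl (by omega)
  · rintro (h | ⟨h1, h2⟩)
    · exact Or.inl h
    · exact Or.inr ⟨by omega, h2⟩

lemma pvBefore_false_iff {α : Type} (k1 k2 : α → Int) (a b : α) :
    (decide (k1 a < k1 b) || (!decide (k1 b < k1 a) && decide (k2 a < k2 b))) = false ↔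
      ¬ (k1 a < k1 b ∨ (k1 a = k1 b ∧ k2 a < k2 b)) := by
  rw [Bool.eq_false_iff, Ne, ← pvBefore_iff k1 k2]

lemma pvInsertBy_pairwise {α : Type} (k1 k2 : α → Int) (x : α) (l : List α)
    (hpw : l.Pairwise (fun a b =>
      (decide (k1 b < k1 a) || (!decide (k1 a < k1 b) && decide (k2 b < k2 a))) = false)) :
    (PySem.List.insertBy
        (fun a b => decide (k1 a < k1 b) || (!decide (k1 b < k1 a) && decide (k2 a < k2 b))) x
        l).Pairwise (fun a b =>
      (decide (k1 b < k1 a) || (!decide (k1 a < k1 b) && decide (k2 b < k2 a))) = false) := by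
  induction l with
  | nil => simp [PySem.List.insertBy]
  | cons y ys ih =>
    rw [List.pairwise_cons] at hpw
    rw [PySem.List.insertBy]
    by_cases hxy : (decide (k1 x < k1 y) || (!decide (k1 y < k1 x) && decide (k2 x < k2 y))) = true
    · rw [if_pos hxy]
      rw [pvBefore_iff] at hxy
      refine List.Pairwise.cons ?_ (List.Pairwise.cons hpw.1 hpw.2)
      intro z hz
      rcases List.mem_cons.mp hz with rfl | hz'
      · rw [pvBefore_false_iff]
        omega
      · have h1 := (pvBefore_false_iff k1 k2 z y).mp (hpw.1 z hz')
        rw [pvBefore_false_iff]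
        omega
    · rw [if_neg hxy]
      rw [Bool.not_eq_true, pvBefore_false_iff] at hxy
      refine List.Pairwise.cons ?_ (ih hpw.2)
      intro z hz
      rcases (PySem.List.mem_insertBy _ _ _ _).mp hz with rfl | hz'
      · rw [pvBefore_false_iff]
        omega
      · exact hpw.1 z hz'

lemma pvSorted2_pairwise {α : Type} (xs : List α) (k1 k2 : α → Int) :
    (PySem.List.sorted2 xs k1 k2 false).Pairwise (fun a b =>
      (decide (k1 b < k1 a) || (!decide (k1 a < k1 b) && decide (k2 b < k2 a))) = false) := by
  have : ∀ (l : List α) (acc : List α), acc.Pairwise (fun a b =>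
      (decide (k1 b < k1 a) || (!decide (k1 a < k1 b) && decide (k2 b < k2 a))) = false) →
      (l.foldl (fun acc x => PySem.List.insertBy
        (fun a b => decide (k1 a < k1 b) || (!decide (k1 b < k1 a) && decide (k2 a < k2 b))) x
        acc) acc).Pairwise (fun a b =>
      (decide (k1 b < k1 a) || (!decide (k1 a < k1 b) && decide (k2 b < k2 a))) = false) := by
    intro l
    induction l with
    | nil => exact fun acc h => h
    | cons x rest ih =>
      intro acc h
      exact ih _ (pvInsertBy_pairwise k1 k2 x acc h)
  exact this xs [] (by simp)

lemma pvSortedUniq {α : Type} (k1 k2 : α → Int) (ys : List α) :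
    ∀ (zs : List α), zs.Perm ys →
    zs.Pairwise (fun a b =>
      (decide (k1 b < k1 a) || (!decide (k1 a < k1 b) && decide (k2 b < k2 a))) = false) →
    ys.Pairwise (fun a b => k1 a < k1 b ∨ (k1 a = k1 b ∧ k2 a < k2 b)) →
    zs = ys := by
  induction ys with
  | nil => intro zs hperm _ _; exact hperm.eq_nil
  | cons y ys' ih =>
    intro zs hperm hz hy
    rcases zs with _ | ⟨z, zs'⟩
    · exact absurd hperm.symm (by simp)
    rw [List.pairwise_cons] at hz hy
    have hzy : z = y := by
      by_contra hne
      have hyz : y ∈ z :: zs' := hperm.mem_iff.mpr List.mem_cons_self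
      have hy' : y ∈ zs' := by
        rcases List.mem_cons.mp hyz with h | h
        · exact absurd h.symm hne
        · exact h
      have hzin : z ∈ y :: ys' := hperm.mem_iff.mp List.mem_cons_self
      have hz' : z ∈ ys' := by
        rcases List.mem_cons.mp hzin with h | h
        · exact absurd h hne
        · exact h
      have h1 := (pvBefore_false_iff k1 k2 y z).mp (hz.1 y hy')
      have h2 := hy.1 z hz'
      omega
    subst hzy
    rw [ih zs' hperm.cons_inv hz.2 hy.2]

lemma pvSorted2_eq {α : Type} (xs ys : List α) (k1 k2 : α → Int) (hperm : ys.Perm xs)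
    (hpw : ys.Pairwise (fun a b => k1 a < k1 b ∨ (k1 a = k1 b ∧ k2 a < k2 b))) :
    PySem.List.sorted2 xs k1 k2 false = ys := by
  refine pvSortedUniq k1 k2 ys (PySem.List.sorted2 xs k1 k2 false) ?_
    (pvSorted2_pairwise xs k1 k2) hpw
  exact (PySem.List.sorted2_perm xs k1 k2 false).trans hperm.symm

lemma pvDedup_append {α : Type} [BEq α] [LawfulBEq α] (ys : List α) (x : α) :
    PySem.List.dedup (ys ++ [x]) =
      if x ∈ ys then PySem.List.dedup ys else PySem.List.dedup ys ++ [x] := by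
  have h1 : PySem.List.dedup (ys ++ [x]) = PySem.Set.add (PySem.List.dedup ys) x := by
    simp only [PySem.List.dedup, PySem.Set.ofList, List.foldl_append, List.foldl_cons,
      List.foldl_nil]
  rw [h1]
  simp only [PySem.Set.add]
  have hcx : PySem.Set.contains (PySem.List.dedup ys) x = decide (x ∈ ys) := by
    simp [PySem.Set.contains]
  rw [hcx]
  by_cases h : x ∈ ys
  · rw [if_pos (by simp [h]), if_pos h]
  · rw [if_neg (by simp [h]), if_neg h]

lemma pvA_build_aux (L : List String) :
    ((L.foldl (fun (st : PySem.Dict String (List String) × List String) path =>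
      let parent := sample_parent path
      let st := if st.1.contains parent then st else (st.1.insert parent [], st.2 ++ [parent])
      (st.1.modify parent [] (fun bkt => bkt ++ [path]), st.2)) (PySem.Dict.empty, [])).2
        = PySem.List.dedup (L.map sample_parent)) ∧
    (∀ q, ((L.foldl (fun (st : PySem.Dict String (List String) × List String) path =>
      let parent := sample_parent path
      let st := if st.1.contains parent then st else (st.1.insert parent [], st.2 ++ [parent])
      (st.1.modify parent [] (fun bkt => bkt ++ [path]), st.2)) (PySem.Dict.empty, [])).1.contains q
        = decide (q ∈ PySem.List.dedup (L.map sample_parent)))) ∧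
    (∀ q, ((L.foldl (fun (st : PySem.Dict String (List String) × List String) path =>
      let parent := sample_parent path
      let st := if st.1.contains parent then st else (st.1.insert parent [], st.2 ++ [parent])
      (st.1.modify parent [] (fun bkt => bkt ++ [path]), st.2)) (PySem.Dict.empty, [])).1.getD q []
        = L.filter (fun p => sample_parent p == q))) := by
  induction L using List.reverseRecOn with
  | nil =>
    refine ⟨rfl, fun q => ?_, fun q => ?_⟩
    · simp [PySem.Dict.contains_empty, PySem.List.dedup, PySem.Set.ofList]
    · simp [PySem.Dict.getD_empty]
  | append_singleton xs p ih =>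
    obtain ⟨h2, hc, hg⟩ := ih
    rw [List.foldl_append] at *
    simp only [List.foldl_cons, List.foldl_nil]
    set st := xs.foldl (fun (st : PySem.Dict String (List String) × List String) path =>
      let parent := sample_parent path
      let st := if st.1.contains parent then st else (st.1.insert parent [], st.2 ++ [parent])
      (st.1.modify parent [] (fun bkt => bkt ++ [path]), st.2)) (PySem.Dict.empty, []) with hst
    simp only [List.map_append, List.map_cons, List.map_nil]
    rw [pvDedup_append]
    by_cases hmem : sample_parent p ∈ xs.map sample_parent
    · rw [if_pos hmem]
      have hcon : st.1.contains (sample_parent p) = true := by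
        rw [hc, decide_eq_true_iff, PySem.List.mem_dedup]; exact hmem
      rw [if_pos hcon]
      refine ⟨h2, fun q => ?_, fun q => ?_⟩
      · simp only [PySem.Dict.modify, PySem.Dict.contains_insert]
        rw [hc q]
        by_cases hq : q = sample_parent p
        · subst hq
          simp [PySem.List.mem_dedup, hmem]
        · simp [beq_iff_eq, hq]
      · simp only [PySem.Dict.modify]
        by_cases hq : q = sample_parent p
        · subst hq
          rw [show PySem.Dict.insert = fun (d : PySem.Dict String (List String)) k v => d.insert k v from rfl]
          rw [PySem.Dict.getD_insert]
          rw [if_pos rfl, hg, List.filter_append, List.filter_singleton]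
          simp
        · rw [PySem.Dict.getD_insert, if_neg hq, hg, List.filter_append, List.filter_singleton]
          simp only [beq_iff_eq, cond_eq_if]
          rw [if_neg (fun h => hq (Eq.symm h))]
          simp
    · rw [if_neg hmem]
      have hcon : st.1.contains (sample_parent p) = false := by
        rw [hc, decide_eq_false_iff_not, PySem.List.mem_dedup]; exact hmem
      rw [if_neg (by rw [hcon]; simp)]
      refine ⟨by rw [h2], fun q => ?_, fun q => ?_⟩
      · simp only [PySem.Dict.modify, PySem.Dict.contains_insert]
        rw [hc q]
        by_cases hq : q = sample_parent p
        · subst hq; simp [PySem.List.mem_dedup]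
        · simp [beq_iff_eq, hq, List.mem_append]
      · simp only [PySem.Dict.modify]
        by_cases hq : q = sample_parent p
        · subst hq
          rw [PySem.Dict.getD_insert, if_pos rfl, PySem.Dict.getD_insert, if_pos rfl]
          rw [List.filter_append, List.filter_singleton]
          have h0 : xs.filter (fun p' => sample_parent p' == sample_parent p) = [] := by
            rw [List.filter_eq_nil_iff]
            intro a ha
            simp only [beq_iff_eq]
            intro hpar
            exact hmem (hpar ▸ List.mem_map_of_mem ha)
          rw [h0]
          simp
        · rw [PySem.Dict.getD_insert, if_neg hq, PySem.Dict.getD_insert, if_neg hq, hg,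
            List.filter_append]
          rw [List.filter_singleton]
          simp only [beq_iff_eq, cond_eq_if]
          rw [if_neg (fun h => hq (Eq.symm h))]
          simp

lemma pvFoldlInsert_getD_not_mem (ps : List (Int × String)) (d : PySem.Dict String Int)
    (p : String) (h : ∀ ip ∈ ps, ip.2 ≠ p) :
    (ps.foldl (fun d ip => d.insert ip.2 ip.1) d).getD p 0 = d.getD p 0 := by
  induction ps generalizing d with
  | nil => rfl
  | cons ip rest ih =>
    rw [List.foldl_cons, ih _ (fun x hx => h x (List.mem_cons_of_mem ip hx)),
      PySem.Dict.getD_insert, if_neg (fun hc => h ip List.mem_cons_self hc.symm)]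

lemma pvOI_aux (xs : List String) (hnd : xs.Nodup) :
    ∀ (s : Int) (d : PySem.Dict String Int) (p : String), p ∈ xs →
    ((PySem.List.enumerate xs s).foldl (fun d ip => d.insert ip.2 ip.1) d).getD p 0
      = s + (List.idxOf p xs : Int) := by
  induction xs with
  | nil => simp
  | cons x rest ih =>
    rw [List.nodup_cons] at hnd
    intro s d p hp
    rw [PySem.List.enumerate_cons, List.foldl_cons]
    by_cases hpx : p = x
    · subst hpx
      rw [pvFoldlInsert_getD_not_mem _ _ p (by
        intro ip hip hc
        obtain ⟨k, hk, hik⟩ := (PySem.List.mem_enumerate_iff _ _ _).mp hip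
        have : ip.2 ∈ rest := by rw [hik]; exact List.getElem_mem hk
        exact hnd.1 (hc ▸ this))]
      rw [PySem.Dict.getD_insert, if_pos rfl, List.idxOf_cons_self]
      simp
    · have hpr : p ∈ rest := by
        rcases List.mem_cons.mp hp with h | h
        · exact absurd h hpx
        · exact h
      rw [ih hnd.2 (s + 1) _ p hpr]
      rw [List.idxOf_cons]
      have hbx : (x == p) = false := by
        rw [beq_eq_false_iff_ne]
        exact fun h => hpx h.symm
      rw [hbx, cond_false]
      push_cast
      ring

lemma pvB_aux (xs : List String) (hnd : xs.Nodup) :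
    (∀ q, ((xs.foldl
      (fun (st : PySem.Dict String Int × PySem.Dict String Int × PySem.Dict String Int) path =>
        let parent := sample_parent path
        let bidx := if st.1.contains parent then st.1 else st.1.insert parent (st.1.size : Int)
        let r := st.2.2.getD parent 0
        (bidx, st.2.1.insert path r, st.2.2.insert parent (r + 1)))
      (PySem.Dict.empty, PySem.Dict.empty, PySem.Dict.empty)).1.contains q
        = decide (q ∈ PySem.List.dedup (xs.map sample_parent)))) ∧
    (((xs.foldl
      (fun (st : PySem.Dict String Int × PySem.Dict String Int × PySem.Dict String Int) path =>
        let parent := sample_parent path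
        let bidx := if st.1.contains parent then st.1 else st.1.insert parent (st.1.size : Int)
        let r := st.2.2.getD parent 0
        (bidx, st.2.1.insert path r, st.2.2.insert parent (r + 1)))
      (PySem.Dict.empty, PySem.Dict.empty, PySem.Dict.empty)).1.size
        = (PySem.List.dedup (xs.map sample_parent)).length)) ∧
    (∀ q ∈ PySem.List.dedup (xs.map sample_parent), ((xs.foldl
      (fun (st : PySem.Dict String Int × PySem.Dict String Int × PySem.Dict String Int) path =>
        let parent := sample_parent path
        let bidx := if st.1.contains parent then st.1 else st.1.insert parent (st.1.size : Int)
        let r := st.2.2.getD parent 0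
        (bidx, st.2.1.insert path r, st.2.2.insert parent (r + 1)))
      (PySem.Dict.empty, PySem.Dict.empty, PySem.Dict.empty)).1.getD q 0
        = (List.idxOf q (PySem.List.dedup (xs.map sample_parent)) : Int))) ∧
    (∀ q, ((xs.foldl
      (fun (st : PySem.Dict String Int × PySem.Dict String Int × PySem.Dict String Int) path =>
        let parent := sample_parent path
        let bidx := if st.1.contains parent then st.1 else st.1.insert parent (st.1.size : Int)
        let r := st.2.2.getD parent 0
        (bidx, st.2.1.insert path r, st.2.2.insert parent (r + 1)))
      (PySem.Dict.empty, PySem.Dict.empty, PySem.Dict.empty)).2.2.getD q 0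
        = ((xs.filter (fun p' => sample_parent p' == q)).length : Int))) ∧
    (∀ p ∈ xs, ((xs.foldl
      (fun (st : PySem.Dict String Int × PySem.Dict String Int × PySem.Dict String Int) path =>
        let parent := sample_parent path
        let bidx := if st.1.contains parent then st.1 else st.1.insert parent (st.1.size : Int)
        let r := st.2.2.getD parent 0
        (bidx, st.2.1.insert path r, st.2.2.insert parent (r + 1)))
      (PySem.Dict.empty, PySem.Dict.empty, PySem.Dict.empty)).2.1.getD p 0
        = (List.idxOf p (xs.filter (fun p' => sample_parent p' == sample_parent p)) : Int))) := by
  induction xs using List.reverseRecOn with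
  | nil =>
    refine ⟨fun q => ?_, rfl, by simp [PySem.List.dedup, PySem.Set.ofList], fun q => ?_, by simp⟩
    · simp [PySem.Dict.contains_empty, PySem.List.dedup, PySem.Set.ofList]
    · simp [PySem.Dict.getD_empty]
  | append_singleton xs p ih =>
    have hpx : p ∉ xs := by
      intro h
      have := List.disjoint_of_nodup_append hnd
      exact this h List.mem_cons_self
    obtain ⟨hB1, hB2, hB3, hC1, hR1⟩ := ih (hnd.sublist (List.sublist_append_left xs [p]))
    rw [List.foldl_append] at *
    simp only [List.foldl_cons, List.foldl_nil]
    set F := xs.foldl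
      (fun (st : PySem.Dict String Int × PySem.Dict String Int × PySem.Dict String Int) path =>
        let parent := sample_parent path
        let bidx := if st.1.contains parent then st.1 else st.1.insert parent (st.1.size : Int)
        let r := st.2.2.getD parent 0
        (bidx, st.2.1.insert path r, st.2.2.insert parent (r + 1)))
      (PySem.Dict.empty, PySem.Dict.empty, PySem.Dict.empty) with hF
    simp only [List.map_append, List.map_cons, List.map_nil, pvDedup_append]
    by_cases hmem : sample_parent p ∈ xs.map sample_parent
    · rw [if_pos hmem]
      have hcon : F.1.contains (sample_parent p) = true := by
        rw [hB1, decide_eq_true_iff, PySem.List.mem_dedup]; exact hmem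
      rw [if_pos hcon]
      refine ⟨hB1, hB2, hB3, fun q => ?_, fun p' hp' => ?_⟩
      · rw [PySem.Dict.getD_insert, List.filter_append, List.filter_singleton]
        by_cases hq : q = sample_parent p
        · subst hq
          rw [if_pos rfl, hC1]
          simp
        · rw [if_neg hq, hC1]
          simp only [beq_iff_eq, cond_eq_if]
          rw [if_neg (fun h => hq (Eq.symm h))]
          simp
      · rw [PySem.Dict.getD_insert, List.filter_append, List.filter_singleton]
        rcases List.mem_append.mp hp' with hin | hp1
        · have hne : p' ≠ p := fun h => hpx (h ▸ hin)
          rw [if_neg hne, hR1 p' hin]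
          by_cases hpp : sample_parent p = sample_parent p'
          · rw [hpp]
            simp only [beq_iff_eq, cond_eq_if, if_pos rfl]
            rw [List.idxOf_append_of_mem]
            rw [List.mem_filter]
            simp [hin]
          · simp only [beq_iff_eq, cond_eq_if]
            rw [if_neg hpp]
            simp
        · have hpeq : p' = p := by simpa using hp1
          subst hpeq
          rw [if_pos rfl, hC1]
          simp only [beq_iff_eq, cond_eq_if, if_pos rfl]
          rw [List.idxOf_append, if_neg (by
            rw [List.mem_filter]
            exact fun hcc => hpx hcc.1)]
          simp
    · rw [if_neg hmem]
      have hcon : F.1.contains (sample_parent p) = false := by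
        rw [hB1, decide_eq_false_iff_not, PySem.List.mem_dedup]; exact hmem
      have hpd : sample_parent p ∉ PySem.List.dedup (xs.map sample_parent) := by
        rw [PySem.List.mem_dedup]; exact hmem
      rw [if_neg (by rw [hcon]; simp)]
      refine ⟨fun q => ?_, ?_, fun q hq => ?_, fun q => ?_, fun p' hp' => ?_⟩
      · rw [PySem.Dict.contains_insert, hB1]
        by_cases hq : q = sample_parent p
        · subst hq; simp [PySem.List.mem_dedup]
        · simp [beq_iff_eq, hq, List.mem_append]
      · rw [PySem.Dict.size_insert, if_neg (by rw [hcon]; simp), hB2]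
        simp
      · rcases List.mem_append.mp hq with hin | hq1
        · have hne : q ≠ sample_parent p := fun h => hpd (h ▸ hin)
          rw [PySem.Dict.getD_insert, if_neg hne, hB3 q hin,
            List.idxOf_append, if_pos hin]
        · have hqe : q = sample_parent p := by simpa using hq1
          subst hqe
          rw [PySem.Dict.getD_insert, if_pos rfl, hB2,
            List.idxOf_append, if_neg hpd]
          simp [List.idxOf_cons_self]
      · rw [PySem.Dict.getD_insert, List.filter_append, List.filter_singleton]
        by_cases hq : q = sample_parent p
        · subst hq
          rw [if_pos rfl, hC1]
          simp
        · rw [if_neg hq, hC1]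
          simp only [beq_iff_eq, cond_eq_if]
          rw [if_neg (fun h => hq (Eq.symm h))]
          simp
      · rw [PySem.Dict.getD_insert, List.filter_append, List.filter_singleton]
        rcases List.mem_append.mp hp' with hin | hp1
        · have hne : p' ≠ p := fun h => hpx (h ▸ hin)
          rw [if_neg hne, hR1 p' hin]
          by_cases hpp : sample_parent p = sample_parent p'
          · rw [hpp]
            simp only [beq_iff_eq, cond_eq_if, if_pos rfl]
            rw [List.idxOf_append_of_mem]
            rw [List.mem_filter]
            simp [hin]
          · simp only [beq_iff_eq, cond_eq_if]
            rw [if_neg hpp]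
            simp
        · have hpeq : p' = p := by simpa using hp1
          subst hpeq
          rw [if_pos rfl, hC1]
          simp only [beq_iff_eq, cond_eq_if, if_pos rfl]
          rw [List.idxOf_append, if_neg (by
            rw [List.mem_filter]
            exact fun hcc => hpx hcc.1)]
          simp

lemma pvFinalSort (L sel : List String) (hndL : L.Nodup) (hnd : sel.Nodup)
    (hsub : ∀ p ∈ sel, p ∈ L) (key : String → Int)
    (hkey : ∀ p ∈ L, key p = (List.idxOf p L : Int)) :
    PySem.List.sorted sel key false = L.filter (fun p => decide (p ∈ sel)) := by
  have hLpw : L.Pairwise (fun a b => (List.idxOf a L : Int) < (List.idxOf b L : Int)) := by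
    rw [List.pairwise_iff_getElem]
    intro i j hi hj hij
    rw [List.Nodup.idxOf_getElem hndL i hi, List.Nodup.idxOf_getElem hndL j hj]
    exact_mod_cast hij
  refine PySem.List.sorted_eq_of_perm_of_pairwise_lt sel (L.filter (fun p => decide (p ∈ sel)))
    key ?_ ?_
  · rw [List.perm_ext_iff_of_nodup (hndL.filter _) hnd]
    intro a
    rw [List.mem_filter]
    simp only [decide_eq_true_iff]
    exact ⟨fun h => h.2, fun h => ⟨hsub a h, h⟩⟩
  · have h1 : (L.filter (fun p => decide (p ∈ sel))).Pairwise
        (fun a b => (List.idxOf a L : Int) < (List.idxOf b L : Int)) :=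
      hLpw.sublist List.filter_sublist
    refine h1.imp_of_mem (fun {a b} ha hb hab => ?_)
    rw [hkey a (List.mem_of_mem_filter ha), hkey b (List.mem_of_mem_filter hb)]
    exact hab

theorem pvMain (paths : List String) (limit : Int) :
    select_representative_files paths limit = select_representative_files_alt paths limit := by
  simp only [select_representative_files, select_representative_files_alt]
  rw [pvA_dedup_eq]
  set L := PySem.List.dedup paths with hL
  have hndL : L.Nodup := PySem.List.nodup_dedup paths
  by_cases hle : (L.length : Int) ≤ limit
  · rw [if_pos hle, if_pos hle]
  · rw [if_neg hle, if_neg hle]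
    push_neg at hle
    set AB := L.foldl (fun (st : PySem.Dict String (List String) × List String) path =>
      let parent := sample_parent path
      let st := if st.1.contains parent then st else (st.1.insert parent [], st.2 ++ [parent])
      (st.1.modify parent [] (fun bkt => bkt ++ [path]), st.2)) (PySem.Dict.empty, []) with hAB
    set BD := L.foldl
      (fun (st : PySem.Dict String Int × PySem.Dict String Int × PySem.Dict String Int) path =>
        let parent := sample_parent path
        let bidx := if st.1.contains parent then st.1 else st.1.insert parent (st.1.size : Int)
        let r := st.2.2.getD parent 0
        (bidx, st.2.1.insert path r, st.2.2.insert parent (r + 1)))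
      (PySem.Dict.empty, PySem.Dict.empty, PySem.Dict.empty) with hBD
    -- A side ---------------------------------------------------------------
    obtain ⟨hbo, _hcon, hgd⟩ := pvA_build_aux L
    rw [← hAB] at hbo hgd
    have hbo2 : AB.2 = pvBO L := hbo
    have hndBO := pvBO_nodup L
    rw [hbo2]
    have hwhile := pvA_while_spec (limit.toNat + 1) AB.1 (pvBO L) limit [] hndBO
    have hgfun : (fun q => AB.1.getD q []) = pvG L := funext (fun q => hgd q)
    rw [hgfun] at hwhile
    simp only [List.length_nil, Nat.cast_zero, List.nil_append, sub_zero] at hwhile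
    rw [hwhile]
    -- shared facts ---------------------------------------------------------
    have htot : pvTotal (pvG L) (pvBO L) ≤ L.length := by
      have hlen := (pvFlatMap_perm L).length_eq
      rw [List.length_flatMap] at hlen
      have heq : pvTotal (pvG L) (pvBO L) = ((pvBO L).map (fun q => (pvG L q).length)).sum := rfl
      omega
    have hperm : (pvRR (L.length + 1) (pvG L) (pvBO L)).Perm L :=
      (pvRR_perm (L.length + 1) (pvG L) (pvBO L) (by omega)).trans (pvFlatMap_perm L)
    have hkLN : limit.toNat ≤ L.length := by omega
    have htake : (pvRR (limit.toNat + 1) (pvG L) (pvBO L)).take limit.toNat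
        = (pvRR (L.length + 1) (pvG L) (pvBO L)).take limit.toNat :=
      pvRR_take_eq _ _ _ _ _ (by omega) (by omega)
    set Sbig := pvRR (L.length + 1) (pvG L) (pvBO L) with hSbig
    have hSnd : Sbig.Nodup := (hperm.nodup_iff).mpr hndL
    set selTake := Sbig.take limit.toNat with hselTake
    have hselnd : selTake.Nodup := hSnd.sublist (List.take_sublist _ _)
    have hselsub : ∀ p ∈ selTake, p ∈ L := by
      intro p hp
      exact hperm.mem_iff.mp (List.mem_of_mem_take hp)
    rw [htake]
    -- A's final sort = filter by membership --------------------------------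
    have hOI : ∀ p ∈ L, ((PySem.List.enumerate L 0).foldl (fun d ip => d.insert ip.2 ip.1)
        (PySem.Dict.empty : PySem.Dict String Int)).getD p 0 = (List.idxOf p L : Int) := by
      intro p hp
      have := pvOI_aux L hndL 0 PySem.Dict.empty p hp
      simpa using this
    rw [pvFinalSort L selTake hndL hselnd hselsub _ hOI]
    -- B side ---------------------------------------------------------------
    obtain ⟨_hB1, _hB2, hB3, _hC1, hR1⟩ := pvB_aux L hndL
    rw [← hBD] at hB3 hR1
    have hpw := pvRR_pairwise L hndL (L.length + 1) 0
    have hdrop : (fun q => (pvG L q).drop 0) = pvG L := by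
      funext q; exact List.drop_zero
    rw [hdrop] at hpw
    have hpwInt : Sbig.Pairwise (fun a b =>
        BD.2.1.getD a 0 < BD.2.1.getD b 0 ∨
          (BD.2.1.getD a 0 = BD.2.1.getD b 0 ∧
            BD.1.getD (sample_parent a) 0 < BD.1.getD (sample_parent b) 0)) := by
      refine (hpw.1).imp_of_mem (fun {a b} ha hb hab => ?_)
      have haL : a ∈ L := (hpw.2 a ha).2
      have hbL : b ∈ L := (hpw.2 b hb).2
      rw [hR1 a haL, hR1 b hbL,
        hB3 (sample_parent a) (by rw [PySem.List.mem_dedup]; exact List.mem_map_of_mem haL),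
        hB3 (sample_parent b) (by rw [PySem.List.mem_dedup]; exact List.mem_map_of_mem hbL)]
      rcases hab with h | ⟨h1, h2⟩
      · exact Or.inl (by exact_mod_cast h)
      · exact Or.inr ⟨by exact_mod_cast h1, by exact_mod_cast h2⟩
    have hsorted2 := pvSorted2_eq L Sbig
      (fun p => BD.2.1.getD p 0) (fun p => BD.1.getD (sample_parent p) 0) hperm hpwInt
    rw [hsorted2]
    have hmax : (max limit 0) = (limit.toNat : Int) := by omega
    rw [hmax, PySem.List.slice_to _ (by positivity), Int.toNat_natCast]
    refine List.filter_congr (fun p _hp => ?_)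
    exact decide_eq_decide.mpr (PySem.Set.mem_ofList _ _).symm

-- ===== VERDICT (by name: the statement is the Claim_ definition above) =====
theorem select_representative_files_spec : Claim_equal_select_representative_files := by
  intro paths limit _
  unfold Spec_select_representative_files
  exact pvMain paths limit
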